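-- pv_equiv track=rewrite | github.com/dacho68/Roulette_Concept | monte_carlo.py | count_streaks
-- ===== SOURCE A (Python) =====
-- def count_streaks(spins, streak_length):
--     """
--     Count the number of non-overlapping streaks of consecutive reds.
--     Returns the count of complete streaks found.
--     """
--     count = 0
--     current_streak = 0
--
--     for spin in spins:
--         if spin == 'R':
--             current_streak += 1
--             if current_streak == streak_length:
--                 count += 1
--                 current_streak = 0  # Reset to count non-overlapping streaks
--         else:
--             current_streak = 0
--
--     return count
-- ===== SOURCE B (Python) =====
-- def count_streaks(spins, streak_length):
--     """
--     Count the number of non-overlapping streaks of consecutive reds.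
--     Returns the count of complete streaks found.
--     """
--     if streak_length <= 0:
--         return 0
--     count = 0
--     i = 0
--     n = len(spins)
--     while i + streak_length <= n:
--         # scan the window [i, i+streak_length) for the first non-red
--         j = i
--         while j < i + streak_length and spins[j] == 'R':
--             j += 1
--         if j == i + streak_length:
--             count += 1
--             i += streak_length       # complete streak: jump past it
--         else:
--             i = j + 1                # jump past the break
--     return count
-- ===== Notes on version B (the rewrite author's own statement) =====
-- stated objective: alternative
-- what changed: Replaces A's per-element state machine (increment-and-reset streak counter) with an index-jumping window search: repeatedly scan the next window of streak_length positions for a non-red and jump past the break (or past the whole window when it is all red), like naive substring search with mismatch skipping.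
import Mathlib
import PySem

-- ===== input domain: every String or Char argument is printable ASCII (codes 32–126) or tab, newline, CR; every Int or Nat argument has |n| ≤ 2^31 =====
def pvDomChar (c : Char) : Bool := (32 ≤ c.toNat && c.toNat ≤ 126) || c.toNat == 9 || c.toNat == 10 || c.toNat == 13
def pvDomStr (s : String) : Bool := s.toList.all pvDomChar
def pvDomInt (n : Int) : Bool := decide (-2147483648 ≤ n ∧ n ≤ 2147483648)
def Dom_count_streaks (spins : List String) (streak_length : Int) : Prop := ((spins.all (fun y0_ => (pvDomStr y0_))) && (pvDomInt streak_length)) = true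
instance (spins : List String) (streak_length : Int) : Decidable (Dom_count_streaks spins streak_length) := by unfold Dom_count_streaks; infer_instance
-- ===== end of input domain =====

-- B replaces A's per-element increment-and-reset streak counter with an index-jumping window
-- search (scan the next window for a non-red and jump past it); objective: alternative.

-- ===== PORT A =====
-- one loop step of A: state (count, current_streak)
def pvStepA (streak_length : Int) (st : Int × Int) (spin : String) : Int × Int :=
  if spin == "R" then
    if st.2 + 1 == streak_length then (st.1 + 1, 0) else (st.1, st.2 + 1)
  else (st.1, 0)

def count_streaks (spins : List String) (streak_length : Int) : Int :=
  (spins.foldl (pvStepA streak_length) (0, 0)).1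

-- ===== PORT B =====
-- inner while loop: advance j while (fewer than rem steps taken) and spins[j] == 'R';
-- rem counts the remaining window positions (initially streak_length). Returns final j.
def pvScan (spins : List String) (j : Nat) (rem : Nat) : Nat :=
  match rem with
  | 0 => j
  | r + 1 => if spins.getD j "" == "R" then pvScan spins (j + 1) r else j

-- termination helper for the outer loop: the scan never moves j backwards
lemma pvScan_ge (spins : List String) : ∀ (rem j : Nat), j ≤ pvScan spins j rem := by
  intro rem
  induction rem with
  | zero => intro j; simp [pvScan]
  | succ r ih =>
      intro j
      unfold pvScan
      split
      · exact Nat.le_trans (Nat.le_succ j) (ih (j + 1))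
      · exact le_rfl

-- outer while loop of B: i is the current position, count the accumulator
def pvJump (spins : List String) (k : Nat) (i : Nat) (count : Int) : Int :=
  if h : i + k ≤ spins.length then
    if hk : 0 < k then
      let j := pvScan spins i k
      if j = i + k then pvJump spins k (i + k) (count + 1)
      else pvJump spins k (j + 1) count
    else count  -- unreachable: B only calls pvJump with 0 < k
  else count
termination_by spins.length - i
decreasing_by
  · omega
  · have := pvScan_ge spins k i; omega

def count_streaks_alt (spins : List String) (streak_length : Int) : Int :=
  if streak_length ≤ 0 then 0
  else pvJump spins streak_length.toNat 0 0

-- ===== PRECONDITION & SPEC =====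
def Spec_count_streaks (spins : List String) (streak_length : Int) (out : Int) : Prop := out = count_streaks_alt spins streak_length
instance (spins : List String) (streak_length : Int) (out : Int) : Decidable (Spec_count_streaks spins streak_length out) := by unfold Spec_count_streaks; infer_instance

-- ===== CLAIM (what is proved, stated in full; the proofs are below) =====
def Claim_equal_count_streaks : Prop := ∀ (spins : List String) (streak_length : Int), Dom_count_streaks spins streak_length → Spec_count_streaks spins streak_length (count_streaks spins streak_length)

-- ===== LEMMAS AND PROOFS =====

-- k ≤ 0: A never trips the equality test (current_streak stays ≥ 0, so current_streak+1 ≥ 1 > k)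
lemma foldA_nonpos (k : Int) (hk : k ≤ 0) :
    ∀ (l : List String) (c cur : Int), 0 ≤ cur →
      (l.foldl (pvStepA k) (c, cur)).1 = c := by
  intro l
  induction l with
  | nil => intro c cur _; simp
  | cons x xs ih =>
      intro c cur hcur
      simp only [List.foldl_cons, pvStepA]
      by_cases hx : x == "R"
      · simp only [hx, if_true]
        have hne : (cur + 1 == k) = false := by
          simp only [beq_eq_false_iff_ne]; omega
        simp only [hne]
        exact ih c (cur + 1) (by omega)
      · simp only [hx]
        exact ih c 0 le_rfl

-- a short list (cur + length < k) never completes a streak: count is unchanged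
lemma foldA_short (k : Int) :
    ∀ (l : List String) (c cur : Int), 0 ≤ cur → cur + l.length < k →
      (l.foldl (pvStepA k) (c, cur)).1 = c := by
  intro l
  induction l with
  | nil => intro c cur _ _; simp
  | cons x xs ih =>
      intro c cur h0 hlen
      simp only [List.length_cons] at hlen
      simp only [List.foldl_cons, pvStepA]
      by_cases hx : x == "R"
      · have hne : (cur + 1 == k) = false := by
          simp only [beq_eq_false_iff_ne]
          push_cast at hlen ⊢; omega
        simp only [hx, if_true, hne]
        exact ih c (cur + 1) (by omega) (by push_cast at hlen ⊢; omega)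
      · simp only [hx]
        exact ih c 0 le_rfl (by push_cast at hlen ⊢; omega)

-- a run of n reds from streak cur: count gains (cur+n)/k, streak becomes (cur+n) % k
lemma foldA_reds (k : Int) (hk : 0 < k) :
    ∀ (n : Nat) (c cur : Int), 0 ≤ cur → cur < k →
      (List.foldl (pvStepA k) (c, cur) (List.replicate n "R")) =
        (c + (cur + n) / k, (cur + n) % k) := by
  intro n
  induction n with
  | zero =>
      intro c cur h0 h1
      simp only [List.replicate, List.foldl_nil, Nat.cast_zero, add_zero]
      rw [Int.ediv_eq_zero_of_lt h0 h1, Int.emod_eq_of_lt h0 h1, add_zero]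
  | succ m ih =>
      intro c cur h0 h1
      rw [List.replicate_succ, List.foldl_cons]
      by_cases he : cur + 1 = k
      · rw [show pvStepA k (c, cur) "R" = (c + 1, 0) from by simp [pvStepA, he]]
        rw [ih (c + 1) 0 le_rfl hk]
        have hsum : cur + (↑(m + 1) : Int) = k + m := by push_cast; omega
        rw [hsum]
        simp only [Prod.mk.injEq, zero_add]
        refine ⟨?_, ?_⟩
        · rw [show (k + (m : Int)) = (m : Int) + k * 1 by ring,
              Int.add_mul_ediv_left _ 1 (by omega : k ≠ 0)]
          ring
        · rw [show (k + (m : Int)) = (m : Int) + k * 1 by ring, Int.add_mul_emod_self_left]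
      · rw [show pvStepA k (c, cur) "R" = (c, cur + 1) from by simp [pvStepA, he]]
        rw [ih c (cur + 1) (by omega) (by omega)]
        have hsum : cur + 1 + (m : Int) = cur + (↑(m + 1) : Int) := by push_cast; ring
        rw [hsum]

-- characterisation of the inner scan: all positions before the result are red,
-- and if it stopped short of the window end, the result position is not red
lemma pvScan_spec (spins : List String) :
    ∀ (rem j : Nat),
      pvScan spins j rem ≤ j + rem ∧
      (∀ m, j ≤ m → m < pvScan spins j rem → spins.getD m "" = "R") ∧
      (pvScan spins j rem < j + rem → ¬ (spins.getD (pvScan spins j rem) "" = "R")) := by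
  intro rem
  induction rem with
  | zero => intro j; refine ⟨by simp [pvScan], fun m h1 h2 => by simp [pvScan] at h2; omega, by simp [pvScan]⟩
  | succ r ih =>
      intro j
      unfold pvScan
      by_cases h : (spins.getD j "" == "R") = true
      · rw [if_pos h]
        obtain ⟨ih1, ih2, ih3⟩ := ih (j + 1)
        refine ⟨by omega, ?_, fun hlt => ih3 (by omega)⟩
        intro m h1 h2
        rcases Nat.eq_or_lt_of_le h1 with rfl | h1'
        · exact beq_iff_eq.mp h
        · exact ih2 m h1' h2
      · rw [if_neg h]
        refine ⟨by omega, fun m h1 h2 => by omega, fun _ => by simpa using h⟩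

-- splitting the suffix at a scan result: [i, j) all red, then (if j < end) the break element
lemma drop_split_reds (spins : List String) (i j : Nat) (hij : i ≤ j) (hjl : j ≤ spins.length)
    (hred : ∀ m, i ≤ m → m < j → spins.getD m "" = "R") :
    spins.drop i = List.replicate (j - i) "R" ++ spins.drop j := by
  have h1 : spins.drop i = (spins.drop i).take (j - i) ++ (spins.drop i).drop (j - i) :=
    (List.take_append_drop _ _).symm
  have h2 : (spins.drop i).drop (j - i) = spins.drop j := by
    rw [List.drop_drop]; congr 1; omega
  have h3 : (spins.drop i).take (j - i) = List.replicate (j - i) "R" := by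
    apply List.eq_replicate_iff.mpr
    constructor
    · rw [List.length_take, List.length_drop]; omega
    · intro b hb
      obtain ⟨p, hp, hpe⟩ := List.mem_iff_getElem.mp hb
      have hp' : p < j - i := by
        have := hp; rw [List.length_take, List.length_drop] at this; omega
      have hpl : i + p < spins.length := by omega
      rw [List.getElem_take, List.getElem_drop] at hpe
      have := hred (i + p) (by omega) (by omega)
      rw [List.getD_eq_getElem _ _ hpl] at this
      rw [← hpe, this]
  rw [← h2, ← h3]; exact h1

-- main correspondence: from streak 0 at position i, A's remaining fold equals B's loop
lemma main_aux (k : Nat) (hk : 0 < k) (spins : List String) :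
    ∀ (d i : Nat) (c : Int), spins.length - i ≤ d →
      ((spins.drop i).foldl (pvStepA (k : Int)) (c, 0)).1 = pvJump spins k i c := by
  intro d
  induction d with
  | zero =>
      intro i c hd
      rw [List.drop_eq_nil_of_le (by omega), pvJump, dif_neg (by omega)]
      simp
  | succ d ih =>
      intro i c hd
      rw [pvJump]
      by_cases hwin : i + k ≤ spins.length
      · obtain ⟨hle, hred, hstop⟩ := pvScan_spec spins k i
        simp only [dif_pos hwin, dif_pos hk]
        by_cases hfull : pvScan spins i k = i + k
        · rw [if_pos hfull]
          have hsplit := drop_split_reds spins i (i + k) (by omega) hwin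
            (fun m h1 h2 => hred m h1 (by rw [hfull]; exact h2))
          rw [hsplit, List.foldl_append,
              foldA_reds (k : Int) (by exact_mod_cast hk) _ c 0 le_rfl (by exact_mod_cast hk)]
          have hkeq : (0 : Int) + ((i + k - i : Nat) : Int) = (k : Int) := by omega
          rw [hkeq, Int.ediv_self, Int.emod_self]
          exact ih (i + k) (c + 1) (by omega)
          exact_mod_cast hk.ne'
        · have hjlt : pvScan spins i k < i + k := lt_of_le_of_ne hle hfull
          have hige : i ≤ pvScan spins i k := pvScan_ge spins k i
          have hjl : pvScan spins i k < spins.length := by omega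
          rw [if_neg hfull]
          have hsplit := drop_split_reds spins i (pvScan spins i k) hige (by omega) hred
          have hdropj : spins.drop (pvScan spins i k)
              = spins[pvScan spins i k] :: spins.drop (pvScan spins i k + 1) :=
            List.drop_eq_getElem_cons hjl
          have hnred : (spins[pvScan spins i k]'hjl == "R") = false := by
            have := hstop hjlt
            rw [List.getD_eq_getElem _ _ hjl] at this
            simpa using this
          rw [hsplit, List.foldl_append,
              foldA_reds (k : Int) (by exact_mod_cast hk) _ c 0 le_rfl (by exact_mod_cast hk),
              hdropj, List.foldl_cons]
          have hlt : (0 : Int) + ((pvScan spins i k - i : Nat) : Int) < (k : Int) := by omega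
          rw [Int.ediv_eq_zero_of_lt (by omega) hlt, Int.emod_eq_of_lt (by omega) hlt, add_zero]
          rw [show pvStepA (k : Int) (c, 0 + ((pvScan spins i k - i : Nat) : Int))
                spins[pvScan spins i k] = (c, 0) from by simp [pvStepA, hnred]]
          exact ih (pvScan spins i k + 1) c (by omega)
      · rw [dif_neg hwin]
        have : (spins.drop i).length < k := by rw [List.length_drop]; omega
        exact foldA_short (k : Int) (spins.drop i) c 0 le_rfl (by push_cast; omega)

-- ===== VERDICT (by name: the statement is the Claim_ definition above) =====
theorem count_streaks_spec : Claim_equal_count_streaks := by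
  intro spins sl _
  unfold Spec_count_streaks count_streaks count_streaks_alt
  by_cases hsl : sl ≤ 0
  · simp only [hsl, if_true]
    exact foldA_nonpos sl hsl spins 0 0 le_rfl
  · simp only [hsl, if_false]
    have hk : 0 < sl.toNat := by omega
    have hcast : ((sl.toNat : Int)) = sl := by omega
    have := main_aux sl.toNat hk spins spins.length 0 0 (by omega)
    rw [List.drop_zero] at this
    rw [← hcast]
    exact this
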